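-- pv_equiv track=rewrite | github.com/i-sumitkumar/lca-baselines | ci-builds-repair/ci-builds-repair-benchmark/benhmark_functions.py | get_step_num
-- ===== SOURCE A (Python) =====
-- def check_setup(name):
--     name = name.lower()
--     setup_words = ["checkout", "install", "set up", "setup"]
--     is_setup = any([word in name for word in setup_words])
--
--     return is_setup
--
-- def get_step_num(steps):
--     step_to_insert = 0
--
--     for i, step in enumerate(steps):
--         if "name" in step:
--             if check_setup(step["name"]):
--                 step_to_insert = i + 1
--         if "uses" in step:
--             if check_setup(step["uses"]):
--                 step_to_insert = i + 1
--
--     return step_to_insert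
-- ===== SOURCE B (Python) =====
-- SETUP_WORDS = ("checkout", "install", "set up", "setup")
--
-- def _is_setup_step(step):
--     for key in ("name", "uses"):
--         if key in step:
--             value = step[key].lower()
--             if any(word in value for word in SETUP_WORDS):
--                 return True
--     return False
--
-- def get_step_num(steps):
--     for i in range(len(steps) - 1, -1, -1):
--         if _is_setup_step(steps[i]):
--             return i + 1
--     return 0
-- ===== Notes on version B (the rewrite author's own statement) =====
-- stated objective: alternative
-- what changed: Replaces A's forward pass that overwrites an accumulator on every setup step with a reverse scan that returns immediately at the last setup step.
import Mathlib
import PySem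

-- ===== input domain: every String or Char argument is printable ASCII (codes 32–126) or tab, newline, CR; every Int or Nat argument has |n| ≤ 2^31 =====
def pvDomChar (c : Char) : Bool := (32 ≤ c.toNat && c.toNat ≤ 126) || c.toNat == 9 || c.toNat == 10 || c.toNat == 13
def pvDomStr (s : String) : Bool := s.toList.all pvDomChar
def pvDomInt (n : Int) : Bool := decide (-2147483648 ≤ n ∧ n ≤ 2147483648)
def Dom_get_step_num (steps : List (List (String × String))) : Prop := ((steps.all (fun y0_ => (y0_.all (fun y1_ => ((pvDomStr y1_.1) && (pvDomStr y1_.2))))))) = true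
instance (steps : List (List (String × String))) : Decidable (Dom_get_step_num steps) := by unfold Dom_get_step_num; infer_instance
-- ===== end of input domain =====

-- B replaces A's forward overwrite-accumulator pass with a reverse scan that returns at the
-- last setup step (alternative decomposition; same O(n) cost).

-- ===== PORT A =====
-- check_setup(name)
def checkSetup (name : String) : Bool :=
  let n := PySem.Str.lower name
  (["checkout", "install", "set up", "setup"].map (fun w => PySem.Str.isIn w n)).any id

-- the body of A's for-loop over enumerate(steps), carried as a recursion with index i
def aLoop (acc : Int) (i : Nat) : List (List (String × String)) → Int
  | [] => acc
  | step :: rest =>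
      let d := PySem.Dict.mk step
      let acc := if d.contains "name" then
                   (if checkSetup (d.getD "name" "") then (i : Int) + 1 else acc)
                 else acc
      let acc := if d.contains "uses" then
                   (if checkSetup (d.getD "uses" "") then (i : Int) + 1 else acc)
                 else acc
      aLoop acc (i + 1) rest

def get_step_num (steps : List (List (String × String))) : Int :=
  aLoop 0 0 steps

-- ===== PORT B =====
-- _is_setup_step(step)
def isSetupStep (step : List (String × String)) : Bool :=
  (["name", "uses"] : List String).any (fun key =>
    match (PySem.Dict.mk step).get? key with
    | some v => (["checkout", "install", "set up", "setup"] : List String).any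
                  (fun word => PySem.Str.isIn word (PySem.Str.lower v))
    | none => false)

-- the reverse for-loop: scans the reversed suffix, n = current index + 1
def bLoop : List (List (String × String)) → Nat → Int
  | [], _ => 0
  | step :: rest, n => if isSetupStep step then (n : Int) else bLoop rest (n - 1)

def get_step_num_alt (steps : List (List (String × String))) : Int :=
  bLoop steps.reverse steps.length

-- ===== PRECONDITION & SPEC =====
def Spec_get_step_num (steps : List (List (String × String))) (out : Int) : Prop := out = get_step_num_alt steps
instance (steps : List (List (String × String))) (out : Int) : Decidable (Spec_get_step_num steps out) := by unfold Spec_get_step_num; infer_instance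

-- ===== CLAIM (what is proved, stated in full; the proofs are below) =====
def Claim_equal_get_step_num : Prop := ∀ (steps : List (List (String × String))), Dom_get_step_num steps → Spec_get_step_num steps (get_step_num steps)

-- ===== LEMMAS AND PROOFS =====

-- A's two-guard update of the accumulator collapses to B's single per-step predicate
set_option maxHeartbeats 1000000 in
lemma aStep_eq (step : List (String × String)) (i : Nat) (acc : Int) :
    (let d := PySem.Dict.mk step
     let acc := if d.contains "name" then
                  (if checkSetup (d.getD "name" "") then (i : Int) + 1 else acc)
                else acc
     if d.contains "uses" then
       (if checkSetup (d.getD "uses" "") then (i : Int) + 1 else acc)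
     else acc)
    = if isSetupStep step then (i : Int) + 1 else acc := by
  dsimp only
  rw [show (PySem.Dict.mk step).contains "name" = ((PySem.Dict.mk step).get? "name").isSome
        from PySem.Dict.contains_eq_isSome_get? ..,
      show (PySem.Dict.mk step).contains "uses" = ((PySem.Dict.mk step).get? "uses").isSome
        from PySem.Dict.contains_eq_isSome_get? ..,
      PySem.Dict.getD_eq_get?_getD, PySem.Dict.getD_eq_get?_getD]
  cases hn : (PySem.Dict.mk step).get? "name" <;>
    cases hu : (PySem.Dict.mk step).get? "uses" <;>
      simp [isSetupStep, checkSetup, hn, hu] <;> (split_ifs <;> tauto)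

-- bLoop splits over an append: a match in the front wins, else continue in the back
lemma bLoop_append (xs ys : List (List (String × String))) (n : Nat) :
    bLoop (xs ++ ys) n
      = if xs.any isSetupStep then bLoop xs n else bLoop ys (n - xs.length) := by
  induction xs generalizing n with
  | nil => simp
  | cons x xs ih =>
      by_cases h : isSetupStep x = true
      · simp [bLoop, h]
      · simp only [Bool.not_eq_true] at h
        simp [bLoop, h, ih, Nat.sub_sub]
        ring_nf

-- without any setup step bLoop returns 0
lemma bLoop_none {xs : List (List (String × String))} (h : xs.any isSetupStep = false)
    (n : Nat) : bLoop xs n = 0 := by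
  have := bLoop_append xs [] n
  simpa [h, bLoop] using this

-- main loop invariant: A's forward fold equals B's reverse search
lemma loop_eq (steps : List (List (String × String))) :
    ∀ (acc : Int) (i : Nat),
      aLoop acc i steps
        = if steps.any isSetupStep then bLoop steps.reverse (i + steps.length) else acc := by
  induction steps with
  | nil => intro acc i; simp [aLoop]
  | cons s rest ih =>
      intro acc i
      show aLoop _ (i + 1) rest = _
      rw [aStep_eq, ih]
      rw [List.reverse_cons, bLoop_append]
      by_cases hr : rest.any isSetupStep = true
      · simp [hr, List.any_reverse, Nat.add_comm, Nat.add_left_comm]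
      · simp only [Bool.not_eq_true] at hr
        by_cases hs : isSetupStep s = true <;>
          simp [hr, hs, List.any_reverse, bLoop] <;> omega

-- ===== VERDICT (by name: the statement is the Claim_ definition above) =====
theorem get_step_num_spec : Claim_equal_get_step_num := by
  intro steps _
  unfold Spec_get_step_num get_step_num get_step_num_alt
  rw [loop_eq]
  by_cases h : steps.any isSetupStep = true
  · simp [h]
  · simp only [Bool.not_eq_true] at h
    simp only [h, Bool.false_eq_true, if_false]
    exact (bLoop_none (by simpa [List.any_reverse] using h) _).symm
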